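-- pv_equiv track=rewrite | github.com/rrti/aoc | 2017/day00.py | calc_point_bounds
-- ===== SOURCE A (Python) =====
-- def calc_point_bounds(points, bounds):
-- 	## expand bounding-box around each marker
-- 	for point in points:
-- 		bounds[0] = min(bounds[0], point[0])
-- 		bounds[1] = min(bounds[1], point[1])
-- 		bounds[2] = max(bounds[2], point[0])
-- 		bounds[3] = max(bounds[3], point[1])
-- 		## part 1; maximum distance of any marker from origin
-- 		bounds[4] = max(bounds[4], abs(point[0]) + abs(point[1]))
--
-- 	return bounds
-- ===== SOURCE B (Python) =====
-- def calc_point_bounds(points, bounds):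
-- 	## divide-and-conquer: recursively split the point list, merge 5-tuples
-- 	## (minx, miny, maxx, maxy, maxdist), then fold the one merged tuple into bounds
-- 	if points:
-- 		t = _bbox(points)
-- 		bounds[0] = min(bounds[0], t[0])
-- 		bounds[1] = min(bounds[1], t[1])
-- 		bounds[2] = max(bounds[2], t[2])
-- 		bounds[3] = max(bounds[3], t[3])
-- 		bounds[4] = max(bounds[4], t[4])
-- 	return bounds
--
-- def _bbox(pts):
-- 	## pts is nonempty
-- 	if len(pts) == 1:
-- 		x, y = pts[0]
-- 		return (x, y, x, y, abs(x) + abs(y))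
-- 	mid = len(pts) // 2
-- 	l = _bbox(pts[:mid])
-- 	r = _bbox(pts[mid:])
-- 	return (min(l[0], r[0]), min(l[1], r[1]), max(l[2], r[2]), max(l[3], r[3]), max(l[4], r[4]))
-- ===== Notes on version B (the rewrite author's own statement) =====
-- stated objective: alternative
-- what changed: A makes five in-place updates to bounds per point in one linear loop; B computes a single (minx,miny,maxx,maxy,maxdist) 5-tuple by divide-and-conquer (recursively splitting the point list and merging the two halves' tuples) and then writes each bound once.
-- outside the precondition, e.g. on calc_point_bounds([(1, 2)], [0, 0]): A raises IndexError, B raises IndexError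
import Mathlib
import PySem

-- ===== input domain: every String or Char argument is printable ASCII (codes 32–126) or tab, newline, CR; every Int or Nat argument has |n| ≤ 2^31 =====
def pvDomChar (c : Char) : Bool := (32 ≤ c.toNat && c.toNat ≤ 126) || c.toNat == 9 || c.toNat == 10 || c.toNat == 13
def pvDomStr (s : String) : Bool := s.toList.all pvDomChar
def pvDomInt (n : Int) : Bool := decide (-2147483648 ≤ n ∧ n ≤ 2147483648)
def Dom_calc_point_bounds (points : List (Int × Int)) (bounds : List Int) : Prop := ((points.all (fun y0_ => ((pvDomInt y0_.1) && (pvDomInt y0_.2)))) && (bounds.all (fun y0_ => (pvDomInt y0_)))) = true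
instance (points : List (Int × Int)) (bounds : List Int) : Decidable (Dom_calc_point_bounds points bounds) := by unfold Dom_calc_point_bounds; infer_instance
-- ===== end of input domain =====

-- B replaces A's single five-updates-per-point loop by a divide-and-conquer merge of
-- (minx,miny,maxx,maxy,maxdist) 5-tuples, written into bounds once at the end; equivalence
-- is about the RETURN value (both Pythons also mutate `bounds` in place in the same way).

-- ===== PORT A =====
-- Python's two-argument min/max and abs on ints, written as explicit comparisons
def pvMin (a b : Int) : Int := if a ≤ b then a else b
def pvMax (a b : Int) : Int := if b ≤ a then a else b
def pvAbs (a : Int) : Int := if a < 0 then -a else a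
-- one loop step: the five in-place updates of A's loop body (pyGetD/pySetD are total
-- forms of bounds[i]; the raising case, points ≠ [] with len(bounds) < 5, is excluded by Pre_)
def pvStepA (b : List Int) (p : Int × Int) : List Int :=
  let b := PySem.List.pySetD b 0 (pvMin (PySem.List.pyGetD b 0 0) p.1)
  let b := PySem.List.pySetD b 1 (pvMin (PySem.List.pyGetD b 1 0) p.2)
  let b := PySem.List.pySetD b 2 (pvMax (PySem.List.pyGetD b 2 0) p.1)
  let b := PySem.List.pySetD b 3 (pvMax (PySem.List.pyGetD b 3 0) p.2)
  PySem.List.pySetD b 4 (pvMax (PySem.List.pyGetD b 4 0) (pvAbs p.1 + pvAbs p.2))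

def calc_point_bounds (points : List (Int × Int)) (bounds : List Int) : List Int :=
  points.foldl pvStepA bounds

-- ===== PORT B =====
-- _bbox from Source B: divide-and-conquer over the point list; the [] branch is unreachable
-- (Source B only calls _bbox on nonempty lists) and is there only to make the match total
def pvBBox : List (Int × Int) → Int × Int × Int × Int × Int
  | [] => (0, 0, 0, 0, 0)
  | [p] => (p.1, p.2, p.1, p.2, pvAbs p.1 + pvAbs p.2)
  | p :: q :: rest =>
    let ps := p :: q :: rest
    let mid := ps.length / 2
    let l := pvBBox (ps.take mid)
    let r := pvBBox (ps.drop mid)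
    (pvMin l.1 r.1, pvMin l.2.1 r.2.1, pvMax l.2.2.1 r.2.2.1,
     pvMax l.2.2.2.1 r.2.2.2.1, pvMax l.2.2.2.2 r.2.2.2.2)
termination_by ps => ps.length
decreasing_by
  · simp [List.length_take]; omega
  · simp [List.length_drop]; omega

def calc_point_bounds_alt (points : List (Int × Int)) (bounds : List Int) : List Int :=
  match points with
  | [] => bounds
  | _ :: _ =>
    let t := pvBBox points
    let b := PySem.List.pySetD bounds 0 (pvMin (PySem.List.pyGetD bounds 0 0) t.1)
    let b := PySem.List.pySetD b 1 (pvMin (PySem.List.pyGetD b 1 0) t.2.1)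
    let b := PySem.List.pySetD b 2 (pvMax (PySem.List.pyGetD b 2 0) t.2.2.1)
    let b := PySem.List.pySetD b 3 (pvMax (PySem.List.pyGetD b 3 0) t.2.2.2.1)
    PySem.List.pySetD b 4 (pvMax (PySem.List.pyGetD b 4 0) t.2.2.2.2)

-- ===== PRECONDITION & SPEC =====
-- A raises IndexError iff points ≠ [] and len(bounds) < 5; exactly those inputs are excluded.
def Pre_calc_point_bounds (points : List (Int × Int)) (bounds : List Int) : Prop :=
  points = [] ∨ 5 ≤ bounds.length
instance (points : List (Int × Int)) (bounds : List Int) : Decidable (Pre_calc_point_bounds points bounds) := by unfold Pre_calc_point_bounds; infer_instance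
def pvWitness_calc_point_bounds : (List (Int × Int)) × List Int := ([(1, 2), (-3, 0)], [0, 0, 0, 0, 0])

def Spec_calc_point_bounds (points : List (Int × Int)) (bounds : List Int) (out : List Int) : Prop := out = calc_point_bounds_alt points bounds
instance (points : List (Int × Int)) (bounds : List Int) (out : List Int) : Decidable (Spec_calc_point_bounds points bounds out) := by unfold Spec_calc_point_bounds; infer_instance

-- ===== CLAIM (what is proved, stated in full; the proofs are below) =====
def Claim_equal_calc_point_bounds : Prop := ∀ (points : List (Int × Int)) (bounds : List Int), Dom_calc_point_bounds points bounds → Pre_calc_point_bounds points bounds → Spec_calc_point_bounds points bounds (calc_point_bounds points bounds)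

-- ===== LEMMAS AND PROOFS =====

-- A's loop body on a bounds list with its five tracked cells exposed
theorem pvStepA_cons (a0 a1 a2 a3 a4 : Int) (t : List Int) (p : Int × Int) :
    pvStepA (a0 :: a1 :: a2 :: a3 :: a4 :: t) p =
      (pvMin a0 p.1) :: (pvMin a1 p.2) :: (pvMax a2 p.1) :: (pvMax a3 p.2)
        :: (pvMax a4 (pvAbs p.1 + pvAbs p.2)) :: t := by
  simp [pvStepA, PySem.List.pySetD_of_nonneg, PySem.List.pyGetD_of_nonneg, List.getD]

-- characterization of A's fold: the five cells hold the running extrema, the tail is untouched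
theorem calcA_char (ps : List (Int × Int)) (a0 a1 a2 a3 a4 : Int) (t : List Int) :
    ps.foldl pvStepA (a0 :: a1 :: a2 :: a3 :: a4 :: t) =
      (ps.foldl (fun a q => pvMin a q.1) a0)
        :: (ps.foldl (fun a q => pvMin a q.2) a1)
        :: (ps.foldl (fun a q => pvMax a q.1) a2)
        :: (ps.foldl (fun a q => pvMax a q.2) a3)
        :: (ps.foldl (fun a q => pvMax a (pvAbs q.1 + pvAbs q.2)) a4) :: t := by
  induction ps generalizing a0 a1 a2 a3 a4 with
  | nil => rfl
  | cons p ps ih => rw [List.foldl_cons, pvStepA_cons, ih]; rfl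

theorem pvMin_assoc (a b c : Int) : pvMin (pvMin a b) c = pvMin a (pvMin b c) := by
  simp only [pvMin]; split_ifs <;> omega

theorem pvMax_assoc (a b c : Int) : pvMax (pvMax a b) c = pvMax a (pvMax b c) := by
  simp only [pvMax]; split_ifs <;> omega

-- pulling the initial accumulator out of a running fold of an associative op
theorem pv_foldl_op_pull (op : Int → Int → Int)
    (hassoc : ∀ a b c, op (op a b) c = op a (op b c))
    (f : Int × Int → Int) (ps : List (Int × Int)) (a x : Int) :
    op a (ps.foldl (fun c q => op c (f q)) x) = ps.foldl (fun c q => op c (f q)) (op a x) := by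
  induction ps generalizing x with
  | nil => rfl
  | cons p ps ih => simp only [List.foldl_cons, ← ih, hassoc]

-- a running fold over an appended list splits into the op of the two halves' folds
theorem pv_foldl_op_append (op : Int → Int → Int)
    (hassoc : ∀ a b c, op (op a b) c = op a (op b c))
    (f : Int × Int → Int) (l' r' : List (Int × Int)) (q : Int × Int) (a : Int) :
    (l' ++ q :: r').foldl (fun c w => op c (f w)) a =
      op (l'.foldl (fun c w => op c (f w)) a) (r'.foldl (fun c w => op c (f w)) (f q)) := by
  rw [List.foldl_append, List.foldl_cons, pv_foldl_op_pull op hassoc]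

-- pvBBox computes the running extrema: the head seeds each fold over the tail
theorem pvBBox_char : ∀ (n : Nat) (ps : List (Int × Int)) (p : Int × Int) (t : List (Int × Int)),
    ps.length ≤ n → ps = p :: t →
    pvBBox ps =
      (t.foldl (fun a q => pvMin a q.1) p.1,
       t.foldl (fun a q => pvMin a q.2) p.2,
       t.foldl (fun a q => pvMax a q.1) p.1,
       t.foldl (fun a q => pvMax a q.2) p.2,
       t.foldl (fun a q => pvMax a (pvAbs q.1 + pvAbs q.2)) (pvAbs p.1 + pvAbs p.2)) := by
  intro n
  induction n with
  | zero => intro ps p t hlen hps; subst hps; simp at hlen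
  | succ n ih =>
    intro ps p t hlen hps
    subst hps
    match t with
    | [] => simp [pvBBox]
    | q :: rest =>
      rw [pvBBox]
      have hL : (p :: q :: rest).length = rest.length + 2 := by simp
      set mid := (p :: q :: rest).length / 2 with hmiddef
      have hm : mid = (rest.length + 2) / 2 := by rw [hmiddef, hL]
      have hlen' : rest.length + 2 ≤ n + 1 := by rw [← hL]; exact hlen
      have htake : (p :: q :: rest).take mid = p :: (q :: rest).take (mid - 1) := by
        obtain ⟨k, hk⟩ : ∃ k, mid = k + 1 := ⟨mid - 1, by omega⟩
        simp [hk]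
      obtain ⟨d, ds, hdrop⟩ : ∃ d ds, (p :: q :: rest).drop mid = d :: ds := by
        cases h : (p :: q :: rest).drop mid with
        | nil =>
          have := congrArg List.length h
          simp at this; omega
        | cons d ds => exact ⟨d, ds, rfl⟩
      have hlt : ((p :: q :: rest).take mid).length ≤ n := by
        simp [List.length_take, hL]; omega
      have hrt : ((p :: q :: rest).drop mid).length ≤ n := by
        simp [List.length_drop, hL]; omega
      rw [ih _ p ((q :: rest).take (mid - 1)) (htake ▸ hlt) htake,
          ih _ d ds (hdrop ▸ hrt) hdrop]
      have htail : (q :: rest).take (mid - 1) ++ d :: ds = q :: rest := by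
        have hsplit : p :: (q :: rest).take (mid - 1) ++ d :: ds = p :: q :: rest := by
          rw [← htake, ← hdrop, List.take_append_drop]
        simpa using hsplit
      conv_rhs => rw [← htail]
      simp only [
        pv_foldl_op_append pvMin pvMin_assoc Prod.fst,
        pv_foldl_op_append pvMin pvMin_assoc Prod.snd,
        pv_foldl_op_append pvMax pvMax_assoc Prod.fst,
        pv_foldl_op_append pvMax pvMax_assoc Prod.snd,
        pv_foldl_op_append pvMax pvMax_assoc (fun w => pvAbs w.1 + pvAbs w.2)]

-- ===== VERDICT (by name: the statement is the Claim_ definition above) =====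
theorem calc_point_bounds_spec : Claim_equal_calc_point_bounds := by
  intro points bounds _ hpre
  unfold Spec_calc_point_bounds
  cases points with
  | nil => rfl
  | cons p ps =>
    have h : 5 ≤ bounds.length := by
      rcases hpre with h | h
      · exact absurd h (by simp)
      · exact h
    rcases bounds with _ | ⟨a0, _ | ⟨a1, _ | ⟨a2, _ | ⟨a3, _ | ⟨a4, t⟩⟩⟩⟩⟩ <;>
      simp only [List.length] at h <;> try omega
    rw [calc_point_bounds, calcA_char]
    show _ = calc_point_bounds_alt (p :: ps) (a0 :: a1 :: a2 :: a3 :: a4 :: t)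
    simp only [calc_point_bounds_alt,
      pvBBox_char (p :: ps).length (p :: ps) p ps le_rfl rfl]
    simp [PySem.List.pySetD_of_nonneg, PySem.List.pyGetD_of_nonneg, List.getD,
      pv_foldl_op_pull pvMin pvMin_assoc, pv_foldl_op_pull pvMax pvMax_assoc]
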